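-- pv_equiv track=rewrite | github.com/indieglo/lexiweave | src/lexiweave/assessment/gap_report.py | _estimate_vocab_cefr
-- ===== SOURCE A (Python) =====
-- VOCAB_CEFR_THRESHOLDS = [
--     (500, "A1"),
--     (1500, "A2"),
--     (3000, "B1"),
--     (5000, "B2"),
--     (8000, "C1"),
-- ]
--
-- def _estimate_vocab_cefr(word_count: int) -> str:
--     """Estimate CEFR level from vocabulary size."""
--     level = "pre-A1"
--     for threshold, cefr in VOCAB_CEFR_THRESHOLDS:
--         if word_count >= threshold:
--             level = cefr
--         else:
--             break
--     return level
-- ===== SOURCE B (Python) =====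
-- import bisect
--
-- _VOCAB_KEYS = [500, 1500, 3000, 5000, 8000]
-- _VOCAB_LEVELS = ["A1", "A2", "B1", "B2", "C1"]
--
-- def _estimate_vocab_cefr(word_count: int) -> str:
--     """Estimate CEFR level from vocabulary size."""
--     i = bisect.bisect_right(_VOCAB_KEYS, word_count)
--     return "pre-A1" if i == 0 else _VOCAB_LEVELS[i - 1]
-- ===== Notes on version B (the rewrite author's own statement) =====
-- stated objective: idiomatic
-- what changed: Replaces the sequential break-loop over (threshold, level) pairs with bisect.bisect_right binary search over a sorted key list plus a parallel level list indexed at i-1.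
import Mathlib
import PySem

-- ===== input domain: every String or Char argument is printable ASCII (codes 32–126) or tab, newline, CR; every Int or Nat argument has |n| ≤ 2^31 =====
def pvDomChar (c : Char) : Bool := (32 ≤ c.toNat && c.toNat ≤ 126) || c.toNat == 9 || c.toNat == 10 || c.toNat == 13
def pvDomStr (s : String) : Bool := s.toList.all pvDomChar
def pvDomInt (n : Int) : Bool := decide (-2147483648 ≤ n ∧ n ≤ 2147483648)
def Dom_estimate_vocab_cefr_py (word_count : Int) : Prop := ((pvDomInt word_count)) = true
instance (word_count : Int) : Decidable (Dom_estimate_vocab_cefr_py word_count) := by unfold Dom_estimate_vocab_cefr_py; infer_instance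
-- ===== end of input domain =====

-- B replaces A's sequential break-loop with a bisect_right binary search over the sorted keys (idiomatic; not faster on 5 entries).

-- ===== PORT A =====
def vocabCefrThresholds : List (Int × String) :=
  [(500, "A1"), (1500, "A2"), (3000, "B1"), (5000, "B2"), (8000, "C1")]

-- the for-loop with break, level as the accumulator
def aLoop (word_count : Int) (level : String) : List (Int × String) → String
  | [] => level
  | (threshold, cefr) :: rest =>
      if word_count ≥ threshold then aLoop word_count cefr rest else level

def estimate_vocab_cefr_py (word_count : Int) : String :=
  aLoop word_count "pre-A1" vocabCefrThresholds

-- ===== PORT B =====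
def vocabKeys : List Int := [500, 1500, 3000, 5000, 8000]
def vocabLevels : List String := ["A1", "A2", "B1", "B2", "C1"]

-- bisect.bisect_right: while lo < hi: mid = (lo+hi)//2; if x < a[mid]: hi = mid else lo = mid+1
def bisectRight (a : List Int) (x : Int) (lo hi : Nat) : Nat :=
  if lo < hi then
    let mid := (lo + hi) / 2
    if x < a.getD mid 0 then bisectRight a x lo mid
    else bisectRight a x (mid + 1) hi
  else lo
termination_by hi - lo
decreasing_by all_goals omega

def estimate_vocab_cefr_py_alt (word_count : Int) : String :=
  let i := bisectRight vocabKeys word_count 0 vocabKeys.length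
  if i = 0 then "pre-A1" else vocabLevels.getD (i - 1) "pre-A1"

-- ===== PRECONDITION & SPEC =====
def Spec_estimate_vocab_cefr_py (word_count : Int) (out : String) : Prop := out = estimate_vocab_cefr_py_alt word_count
instance (word_count : Int) (out : String) : Decidable (Spec_estimate_vocab_cefr_py word_count out) := by unfold Spec_estimate_vocab_cefr_py; infer_instance

-- ===== CLAIM (what is proved, stated in full; the proofs are below) =====
def Claim_equal_estimate_vocab_cefr_py : Prop := ∀ (word_count : Int), Dom_estimate_vocab_cefr_py word_count → Spec_estimate_vocab_cefr_py word_count (estimate_vocab_cefr_py word_count)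

-- ===== LEMMAS AND PROOFS =====
theorem bisect_step_lt (a : List Int) (x : Int) (lo hi : Nat) (hx : x < a.getD ((lo + hi) / 2) 0)
    (h : lo < hi) :
    bisectRight a x lo hi = bisectRight a x lo ((lo + hi) / 2) := by
  rw [bisectRight, if_pos h]
  dsimp only
  rw [if_pos hx]

theorem bisect_step_ge (a : List Int) (x : Int) (lo hi : Nat) (hx : ¬ x < a.getD ((lo + hi) / 2) 0)
    (h : lo < hi) :
    bisectRight a x lo hi = bisectRight a x ((lo + hi) / 2 + 1) hi := by
  rw [bisectRight, if_pos h]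
  dsimp only
  rw [if_neg hx]

theorem bisect_done (a : List Int) (x : Int) (lo hi : Nat) (h : ¬ lo < hi) :
    bisectRight a x lo hi = lo := by
  rw [bisectRight, if_neg h]

-- ===== VERDICT (by name: the statement is the Claim_ definition above) =====
theorem estimate_vocab_cefr_py_spec : Claim_equal_estimate_vocab_cefr_py := by
  intro wc _
  unfold Spec_estimate_vocab_cefr_py estimate_vocab_cefr_py estimate_vocab_cefr_py_alt
  simp only [vocabCefrThresholds, vocabKeys, vocabLevels, aLoop, List.length]
  by_cases h1 : wc < 500
  · have hb : bisectRight [500, 1500, 3000, 5000, 8000] wc 0 (0+1+1+1+1+1) = 0 := by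
      rw [bisect_step_lt, bisect_step_lt, bisect_step_lt, bisect_done] <;>
        norm_num [List.getD] <;> omega
    rw [hb]; norm_num [List.getD]; split_ifs <;> first | rfl | omega
  · by_cases h2 : wc < 1500
    · have hb : bisectRight [500, 1500, 3000, 5000, 8000] wc 0 (0+1+1+1+1+1) = 1 := by
        rw [bisect_step_lt, bisect_step_lt, bisect_step_ge, bisect_done] <;>
          norm_num [List.getD] <;> omega
      rw [hb]; norm_num [List.getD]; split_ifs <;> first | rfl | omega
    · by_cases h3 : wc < 3000
      · have hb : bisectRight [500, 1500, 3000, 5000, 8000] wc 0 (0+1+1+1+1+1) = 2 := by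
          rw [bisect_step_lt, bisect_step_ge, bisect_done] <;>
            norm_num [List.getD] <;> omega
        rw [hb]; norm_num [List.getD]; split_ifs <;> first | rfl | omega
      · by_cases h4 : wc < 5000
        · have hb : bisectRight [500, 1500, 3000, 5000, 8000] wc 0 (0+1+1+1+1+1) = 3 := by
            rw [bisect_step_ge, bisect_step_lt, bisect_step_lt, bisect_done] <;>
              norm_num [List.getD] <;> omega
          rw [hb]; norm_num [List.getD]; split_ifs <;> first | rfl | omega
        · by_cases h5 : wc < 8000
          · have hb : bisectRight [500, 1500, 3000, 5000, 8000] wc 0 (0+1+1+1+1+1) = 4 := by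
              rw [bisect_step_ge, bisect_step_lt, bisect_step_ge, bisect_done] <;>
                norm_num [List.getD] <;> omega
            rw [hb]; norm_num [List.getD]; split_ifs <;> first | rfl | omega
          · have hb : bisectRight [500, 1500, 3000, 5000, 8000] wc 0 (0+1+1+1+1+1) = 5 := by
              rw [bisect_step_ge, bisect_step_ge, bisect_done] <;>
                norm_num [List.getD] <;> omega
            rw [hb]; norm_num [List.getD]; split_ifs <;> first | rfl | omega
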